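-- pv_equiv track=rewrite | github.com/Awesome-sw8-project/experiments | IMU/PDR/src/python/pdr/pdr.py | __step_window
-- ===== SOURCE A (Python) =====
-- def __step_window(signals):
--     start = -1
--     negative_met = False
--     end = 0
--
--     for i in range(len(signals)):
--         if start == -1 and signals[i] == 1:
--             start = i
--
--         if start != -1 and signals[i] == -1:
--             negative_met = True
--
--         if start != -1 and negative_met and signals[i] != -1:
--             return (start, i)
--
--     return None
-- ===== SOURCE B (Python) =====
-- def __step_window(signals):
--     n = len(signals)
--     # Phase 1: first index holding 1
--     start = None
--     for i in range(n):
--         if signals[i] == 1: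
--             start = i
--             break
--     if start is None:
--         return None
--     # Phase 2: first index after start holding -1 (signals[start] == 1, so it can't be start itself)
--     neg = None
--     for j in range(start + 1, n):
--         if signals[j] == -1:
--             neg = j
--             break
--     if neg is None:
--         return None
--     # Phase 3: first index after neg holding something other than -1
--     for k in range(neg + 1, n):
--         if signals[k] != -1:
--             return (start, k)
--     return None
-- ===== Notes on version B (the rewrite author's own statement) =====
-- stated objective: simpler
-- what changed: Replaced the single stateful loop carrying sentinel start=-1 and a negative_met flag by three sequential find-first scans (start of a 1, then the first -1 after it, then the first non--1 after that), each returning None on failure.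
import Mathlib
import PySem

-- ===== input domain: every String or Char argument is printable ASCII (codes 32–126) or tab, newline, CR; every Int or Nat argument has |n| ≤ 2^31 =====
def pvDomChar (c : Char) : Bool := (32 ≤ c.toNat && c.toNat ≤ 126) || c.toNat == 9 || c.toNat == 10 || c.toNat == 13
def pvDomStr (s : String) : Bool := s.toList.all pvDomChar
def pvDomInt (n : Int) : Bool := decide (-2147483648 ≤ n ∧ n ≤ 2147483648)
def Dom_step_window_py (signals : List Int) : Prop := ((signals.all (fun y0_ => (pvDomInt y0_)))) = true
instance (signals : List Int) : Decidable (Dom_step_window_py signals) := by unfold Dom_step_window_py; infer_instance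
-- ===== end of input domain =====

-- B replaces A's single stateful loop (sentinel start=-1, negative_met flag) with three
-- sequential find-first scans; same O(n) cost, simpler control flow.

-- ===== PORT A =====
-- A's loop over range(len(signals)), carrying (start, negative_met), transliterated as
-- structural recursion over the list with an explicit index.
def stepA : List Int → Int → Int → Bool → Option (Int × Int)
  | [], _, _, _ => none
  | x :: rest, i, start, negMet =>
    let start' := if start == -1 && x == 1 then i else start
    let negMet' := if start' != -1 && x == -1 then true else negMet
    if start' != -1 && negMet' && x != -1 then some (start', i)
    else stepA rest (i + 1) start' negMet'

def step_window_py (signals : List Int) : Option (Int × Int) :=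
  stepA signals 0 (-1) false

-- ===== PORT B =====
-- find-first scan: first index (counting from i) where p holds, together with the tail after it
def findFrom (p : Int → Bool) : List Int → Int → Option (Int × List Int)
  | [], _ => none
  | x :: rest, i => if p x then some (i, rest) else findFrom p rest (i + 1)

def step_window_py_alt (signals : List Int) : Option (Int × Int) :=
  match findFrom (fun x => x == 1) signals 0 with
  | none => none
  | some (start, suf1) =>
    match findFrom (fun x => x == -1) suf1 (start + 1) with
    | none => none
    | some (neg, suf2) =>
      match findFrom (fun x => !(x == -1)) suf2 (neg + 1) with
      | none => none
      | some (e, _) => some (start, e)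

-- ===== PRECONDITION & SPEC =====
def Spec_step_window_py (signals : List Int) (out : Option (Int × Int)) : Prop := out = step_window_py_alt signals
instance (signals : List Int) (out : Option (Int × Int)) : Decidable (Spec_step_window_py signals out) := by unfold Spec_step_window_py; infer_instance

-- ===== CLAIM (what is proved, stated in full; the proofs are below) =====
def Claim_equal_step_window_py : Prop := ∀ (signals : List Int), Dom_step_window_py signals → Spec_step_window_py signals (step_window_py signals)

-- ===== LEMMAS AND PROOFS =====

-- Phase 3: with start fixed (≠ -1) and negative_met already true, A returns at the first non--1.
theorem stepA_phase3 (rest : List Int) (i s : Int) (hs : s ≠ -1) :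
    stepA rest i s true =
      match findFrom (fun x => !(x == -1)) rest i with
      | none => none
      | some (e, _) => some (s, e) := by
  induction rest generalizing i with
  | nil => simp [stepA, findFrom]
  | cons x rest ih =>
    by_cases hx : x = -1 <;> simp [stepA, findFrom, hs, hx, ih]

-- Phase 2: with start fixed (≠ -1) and negative_met false, A waits for the first -1, then phase 3.
theorem stepA_phase2 (rest : List Int) (i s : Int) (hs : s ≠ -1) :
    stepA rest i s false =
      match findFrom (fun x => x == -1) rest i with
      | none => none
      | some (neg, suf) =>
        match findFrom (fun x => !(x == -1)) suf (neg + 1) with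
        | none => none
        | some (e, _) => some (s, e) := by
  induction rest generalizing i with
  | nil => simp [stepA, findFrom]
  | cons x rest ih =>
    by_cases hx : x = -1
    · simp [stepA, findFrom, hs, hx, stepA_phase3 rest (i + 1) s hs]
    · simp [stepA, findFrom, hs, hx, ih]

-- Phase 1: until a 1 is seen, A carries (-1, false); finding one fixes start and continues in phase 2.
theorem stepA_phase1 (rest : List Int) (i : Int) (hi : 0 ≤ i) :
    stepA rest i (-1) false =
      match findFrom (fun x => x == 1) rest i with
      | none => none
      | some (start, suf) =>
        match findFrom (fun x => x == -1) suf (start + 1) with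
        | none => none
        | some (neg, suf2) =>
          match findFrom (fun x => !(x == -1)) suf2 (neg + 1) with
          | none => none
          | some (e, _) => some (start, e) := by
  induction rest generalizing i with
  | nil => simp [stepA, findFrom]
  | cons x rest ih =>
    by_cases hx : x = 1
    · have hi' : i ≠ -1 := by omega
      simp [stepA, findFrom, hx, stepA_phase2 rest (i + 1) i hi']
    · simp [stepA, findFrom, hx, ih (i + 1) (by omega)]

-- ===== VERDICT (by name: the statement is the Claim_ definition above) =====
theorem step_window_py_spec : Claim_equal_step_window_py := by
  intro signals _
  unfold Spec_step_window_py step_window_py step_window_py_alt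
  exact stepA_phase1 signals 0 (by norm_num)
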